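-- pv_equiv track=rewrite | github.com/mikolajsiewruk/JakNieDojade | Visualizations/maps_plots_mst.py | path_creation
-- ===== SOURCE A (Python) =====
-- import collections
--
-- def path_creation(edges):
--     graph = collections.defaultdict(list)
--     for edge in edges:
--         u = edge[0]
--         v = edge[-1]
--         graph[u].append((v, tuple(edge)))
--         graph[v].append((u, tuple(edge[::-1])))
--
--     def dfs(current, visited_edges, path):
--         while graph[current]:
--             neighbor, edge = graph[current].pop()
--             if edge not in visited_edges:
--                 visited_edges.add(edge)
--                 path.extend(list(edge))
--                 dfs(neighbor, visited_edges, path)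
--
--     visited_edges = set()
--     start_vertex = edges[0][0]
--     full_path = []
--     dfs(start_vertex, visited_edges, full_path)
--
--     return full_path
-- ===== SOURCE B (Python) =====
-- def path_creation(edges):
--     arcs = []
--     for edge in edges:
--         arcs.append((edge[0], edge[-1], tuple(edge)))
--         arcs.append((edge[-1], edge[0], tuple(edge[::-1])))
--     adj = {}
--     for a, b, lbl in arcs:
--         adj.setdefault(a, []).insert(0, (b, lbl))
--     seen = set()
--     path = []
--     stack = [edges[0][0]]
--     while stack:
--         cur = stack[-1]
--         rem = adj.get(cur, [])
--         if rem:
--             b, lbl = rem.pop(0)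
--             if lbl not in seen:
--                 seen.add(lbl)
--                 path.extend(lbl)
--                 stack.append(b)
--         else:
--             stack.pop()
--     return path
-- ===== Notes on version B (the rewrite author's own statement) =====
-- stated objective: alternative
-- what changed: A's defaultdict-of-appended-lists plus recursive DFS is replaced by a flat directed-arc list, per-vertex stacks built newest-first and consumed from the front, and an iterative DFS over an explicit vertex stack; same output, same cost.
import Mathlib
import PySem

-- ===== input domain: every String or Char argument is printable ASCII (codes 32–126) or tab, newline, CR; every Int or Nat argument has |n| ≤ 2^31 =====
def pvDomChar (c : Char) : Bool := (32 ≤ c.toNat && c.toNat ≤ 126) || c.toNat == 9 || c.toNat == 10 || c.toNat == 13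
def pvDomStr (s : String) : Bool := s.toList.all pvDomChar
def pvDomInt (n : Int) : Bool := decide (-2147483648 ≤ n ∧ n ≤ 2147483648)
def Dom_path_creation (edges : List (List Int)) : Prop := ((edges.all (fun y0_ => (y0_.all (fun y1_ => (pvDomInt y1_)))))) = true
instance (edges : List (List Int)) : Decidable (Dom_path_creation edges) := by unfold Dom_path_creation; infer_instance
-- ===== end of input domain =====

-- B replaces A's recursion-plus-defaultdict-of-append DFS by a flat arc list, newest-first adjacency
-- stacks consumed from the front, and an iterative explicit vertex stack; objective: alternative
-- decomposition, no speed claim.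

abbrev GraphT := PySem.Dict Int (List (Int × List Int))
abbrev VisT := PySem.Set (List Int)

-- ===== PORT A =====
-- the defaultdict adjacency build: append (v, edge) at u and (u, reversed edge) at v
def buildGraph (edges : List (List Int)) : GraphT :=
  edges.foldl (fun g e =>
    let u := (PySem.List.pyGet? e 0).getD 0          -- edge[0]   (in range under Pre_)
    let v := (PySem.List.pyGet? e (-1)).getD 0       -- edge[-1]
    let g1 := g.insert u (g.getD u [] ++ [(v, e)])
    g1.insert v (g1.getD v [] ++ [(u, (PySem.List.slice? e none none (-1)).getD [])]))
    PySem.Dict.empty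

-- the recursive dfs; fuel only guards termination (2*|edges| bounds the adjacency entries ever popped)
def dfsA : Nat → Int → GraphT → VisT → List Int → GraphT × VisT × List Int
  | 0, _, g, vis, path => (g, vis, path)
  | fuel+1, cur, g, vis, path =>
    match PySem.List.pop? (g.getD cur []) (-1) with   -- while graph[current]: … .pop()
    | none => (g, vis, path)
    | some ((nb, e), rest) =>
      let g' := g.insert cur rest
      if PySem.Set.contains vis e then dfsA fuel cur g' vis path
      else
        let r := dfsA fuel nb g' (PySem.Set.add vis e) (path ++ e)   -- recursive dfs(neighbor)
        dfsA fuel cur r.1 r.2.1 r.2.2                                 -- resume the while loop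

def path_creation (edges : List (List Int)) : List Int :=
  let g := buildGraph edges
  let start := (PySem.List.pyGet? ((PySem.List.pyGet? edges 0).getD []) 0).getD 0  -- edges[0][0]
  (dfsA (2 * edges.length) start g [] []).2.2

-- ===== PORT B =====
-- flat list of directed arcs (from, to, label): per edge first u→v then v→u
def buildArcs (edges : List (List Int)) : List (Int × Int × List Int) :=
  edges.foldl (fun acc edge =>
    (acc ++ [((PySem.List.pyGet? edge 0).getD 0, (PySem.List.pyGet? edge (-1)).getD 0, edge)]) ++
    [((PySem.List.pyGet? edge (-1)).getD 0, (PySem.List.pyGet? edge 0).getD 0,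
      (PySem.List.slice? edge none none (-1)).getD [])]) []

-- per-vertex stacks, newest arc in front ('adj.setdefault(a, []).insert(0, (b, lbl))')
def buildAdj (arcs : List (Int × Int × List Int)) : GraphT :=
  arcs.foldl (fun d t => d.insert t.1 ((t.2.1, t.2.2) :: d.getD t.1 [])) PySem.Dict.empty

-- iterative DFS: explicit stack of vertices, head of the list = top of the stack; 'rem.pop(0)'
def loopB : Nat → List Int → GraphT → VisT → List Int → GraphT × VisT × List Int
  | _, [], d, vis, path => (d, vis, path)
  | 0, _ :: _, d, vis, path => (d, vis, path)
  | fuel+1, cur :: rest, d, vis, path =>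
    match d.getD cur [] with                      -- rem = adj.get(cur, [])
    | [] => loopB fuel rest d vis path            -- else: stack.pop()
    | (nb, lbl) :: rem =>
      let d' := d.insert cur rem                  -- rem.pop(0)
      if PySem.Set.contains vis lbl then loopB fuel (cur :: rest) d' vis path
      else loopB fuel (nb :: cur :: rest) d' (PySem.Set.add vis lbl) (path ++ lbl)

def path_creation_alt (edges : List (List Int)) : List Int :=
  let adj := buildAdj (buildArcs edges)
  let start := (PySem.List.pyGet? ((PySem.List.pyGet? edges 0).getD []) 0).getD 0  -- edges[0][0]
  (loopB (4 * edges.length + 1) [start] adj [] []).2.2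

-- ===== PRECONDITION & SPEC =====
-- Pre_ excludes exactly the inputs where Python A raises IndexError: empty edges (edges[0]) or an
-- empty inner edge (edge[0]).
def Pre_path_creation (edges : List (List Int)) : Prop :=
  edges ≠ [] ∧ ∀ e ∈ edges, e ≠ []
instance (edges : List (List Int)) : Decidable (Pre_path_creation edges) := by
  unfold Pre_path_creation; infer_instance
def pvWitness_path_creation : List (List Int) := [[0, 1], [1, 2]]

def Spec_path_creation (edges : List (List Int)) (out : List Int) : Prop := out = path_creation_alt edges
instance (edges : List (List Int)) (out : List Int) : Decidable (Spec_path_creation edges out) := by unfold Spec_path_creation; infer_instance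

-- ===== CLAIM (what is proved, stated in full; the proofs are below) =====
def Claim_equal_path_creation : Prop := ∀ (edges : List (List Int)), Dom_path_creation edges → Pre_path_creation edges → Spec_path_creation edges (path_creation edges)

-- ===== LEMMAS AND PROOFS =====

-- B's adjacency stacks are A's adjacency lists reversed, pointwise
def AdjRel (gA dB : GraphT) : Prop := ∀ k, dB.getD k [] = (gA.getD k []).reverse
-- total number of adjacency entries in the graph: the termination measure
def msize (g : GraphT) : Nat := (g.items.map (fun p => p.2.length)).sum
-- the dict has no duplicate keys (true for every dict built through the API)
def GOK (g : GraphT) : Prop := (g.items.map Prod.fst).Nodup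

-- the two arcs Source B records for one edge
def arc1 (e : List Int) : Int × Int × List Int :=
  ((PySem.List.pyGet? e 0).getD 0, (PySem.List.pyGet? e (-1)).getD 0, e)
def arc2 (e : List Int) : Int × Int × List Int :=
  ((PySem.List.pyGet? e (-1)).getD 0, (PySem.List.pyGet? e 0).getD 0,
   (PySem.List.slice? e none none (-1)).getD [])
def stepB (d : GraphT) (t : Int × Int × List Int) : GraphT :=
  d.insert t.1 ((t.2.1, t.2.2) :: d.getD t.1 [])

lemma pop?_nil {a : Type} : PySem.List.pop? ([] : List a) (-1) = none := by
  simp [PySem.List.pop?, PySem.List.pyIdx?]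

lemma getD_len_le (g : GraphT) (k : Int) : (g.getD k []).length ≤ msize g := by
  unfold msize PySem.Dict.getD PySem.Dict.get?
  cases hf : g.items.find? (fun p => p.1 == k) with
  | none => simp
  | some p =>
    have hm := List.mem_of_find?_eq_some hf
    simp only [Option.map_some, Option.getD_some]
    exact List.single_le_sum (by simp) _ (List.mem_map_of_mem hm)

lemma sum_replace : ∀ (l : List (Int × List (Int × List Int))) (k : Int) (v : List (Int × List Int))
    (p0 : Int × List (Int × List Int)),
    (l.map Prod.fst).Nodup →
    l.find? (fun p => p.1 == k) = some p0 →
    ((l.map (fun p => if p.1 == k then (k, v) else p)).map (fun p => p.2.length)).sum + p0.2.length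
      = (l.map (fun p => p.2.length)).sum + v.length := by
  intro l k v p0 hnd hf
  induction l with
  | nil => simp at hf
  | cons a t ih =>
    rw [List.map_cons, List.nodup_cons] at hnd
    obtain ⟨hna, hndt⟩ := hnd
    simp only [List.map_cons, List.sum_cons]
    by_cases ha : a.1 = k
    · have hp0 : p0 = a := by
        rw [List.find?_cons_of_pos (by simp [ha])] at hf
        exact (Option.some_injective _ hf).symm
      have htid : t.map (fun p => if p.1 == k then (k, v) else p) = t := by
        conv_rhs => rw [← List.map_id t]
        apply List.map_congr_left
        intro p hp
        have hpk : p.1 ≠ k := by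
          intro e
          apply hna
          rw [ha, ← e]
          exact List.mem_map_of_mem hp
        simp [hpk]
      rw [if_pos (by simp [ha]), htid, hp0]
      have hv : ((k, v) : Int × List (Int × List Int)).2 = v := rfl
      rw [hv]
      omega
    · rw [List.find?_cons_of_neg (by simp [ha])] at hf
      rw [if_neg (by simp [ha])]
      have := ih hndt hf
      omega

lemma gok_insert (g : GraphT) (k : Int) (v : List (Int × List Int)) (h : GOK g) :
    GOK (g.insert k v) := by
  unfold GOK PySem.Dict.insert at *
  by_cases hc : g.contains k = true
  · rw [if_pos hc]
    have hcongr : ∀ p ∈ g.items,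
        (Prod.fst ∘ fun p => if p.1 == k then (k, v) else p) p = Prod.fst p := by
      intro p _
      by_cases hp : p.1 = k <;> simp [hp]
    show (List.map Prod.fst (g.items.map _)).Nodup
    rw [List.map_map, List.map_congr_left hcongr]
    exact h
  · rw [if_neg hc]
    have hk : k ∉ g.items.map Prod.fst := by
      intro hm
      obtain ⟨p, hp, he⟩ := List.mem_map.mp hm
      unfold PySem.Dict.contains at hc
      exact hc (List.any_eq_true.mpr ⟨p, hp, by simp [he]⟩)
    simp only [List.map_append, List.map_cons, List.map_nil]
    exact List.Nodup.append h (List.nodup_singleton k) (by simpa using hk)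

lemma msize_insert (g : GraphT) (k : Int) (v : List (Int × List Int)) (h : GOK g) :
    msize (g.insert k v) + (g.getD k []).length = msize g + v.length := by
  unfold msize PySem.Dict.insert PySem.Dict.getD PySem.Dict.get?
  by_cases hc : g.contains k = true
  · rw [if_pos hc]
    unfold PySem.Dict.contains at hc
    obtain ⟨p, hp, hpk⟩ := List.any_eq_true.mp hc
    cases hf : g.items.find? (fun p => p.1 == k) with
    | none => exact absurd (List.find?_eq_none.mp hf p hp) (by simpa using hpk)
    | some p0 =>
      simp only [Option.map_some, Option.getD_some]
      exact sum_replace g.items k v p0 h hf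
  · rw [if_neg hc]
    have hf : g.items.find? (fun p => p.1 == k) = none := by
      apply List.find?_eq_none.mpr
      intro p hp
      unfold PySem.Dict.contains at hc
      simp only [Bool.not_eq_true]
      by_contra hb
      exact hc (List.any_eq_true.mpr ⟨p, hp, by simpa using hb⟩)
    simp [hf]

-- one prepend-insert: Rel, GOK and the +1 measure step, all at once
lemma stepB_one (gA dB : GraphT) (k nb : Int) (lbl : List Int)
    (hR : AdjRel gA dB) (hA : GOK gA) (hB : GOK dB) (hm : msize dB = msize gA) :
    AdjRel (gA.insert k (gA.getD k [] ++ [(nb, lbl)])) (stepB dB (k, nb, lbl))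
    ∧ GOK (gA.insert k (gA.getD k [] ++ [(nb, lbl)])) ∧ GOK (stepB dB (k, nb, lbl))
    ∧ msize (stepB dB (k, nb, lbl)) = msize (gA.insert k (gA.getD k [] ++ [(nb, lbl)])) := by
  have hmA := msize_insert gA k (gA.getD k [] ++ [(nb, lbl)]) hA
  have hmB := msize_insert dB k ((nb, lbl) :: dB.getD k []) hB
  unfold stepB
  simp only []
  refine ⟨?_, gok_insert _ _ _ hA, gok_insert _ _ _ hB, ?_⟩
  · intro j
    rw [PySem.Dict.getD_insert, PySem.Dict.getD_insert]
    by_cases hj : j = k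
    · rw [if_pos hj, if_pos hj, hR k]
      simp
    · rw [if_neg hj, if_neg hj]
      exact hR j
  · simp only [List.length_append, List.length_cons, List.length_nil] at hmA hmB
    omega

lemma build_rel : ∀ (es : List (List Int)) (gA dB : GraphT),
    AdjRel gA dB → GOK gA → GOK dB → msize dB = msize gA →
    AdjRel (es.foldl (fun g e =>
          let u := (PySem.List.pyGet? e 0).getD 0
          let v := (PySem.List.pyGet? e (-1)).getD 0
          let g1 := g.insert u (g.getD u [] ++ [(v, e)])
          g1.insert v (g1.getD v [] ++ [(u, (PySem.List.slice? e none none (-1)).getD [])])) gA)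
        (es.foldl (fun d e => stepB (stepB d (arc1 e)) (arc2 e)) dB)
    ∧ GOK (es.foldl (fun g e =>
          let u := (PySem.List.pyGet? e 0).getD 0
          let v := (PySem.List.pyGet? e (-1)).getD 0
          let g1 := g.insert u (g.getD u [] ++ [(v, e)])
          g1.insert v (g1.getD v [] ++ [(u, (PySem.List.slice? e none none (-1)).getD [])])) gA)
    ∧ GOK (es.foldl (fun d e => stepB (stepB d (arc1 e)) (arc2 e)) dB)
    ∧ msize (es.foldl (fun d e => stepB (stepB d (arc1 e)) (arc2 e)) dB)
        = msize (es.foldl (fun g e =>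
          let u := (PySem.List.pyGet? e 0).getD 0
          let v := (PySem.List.pyGet? e (-1)).getD 0
          let g1 := g.insert u (g.getD u [] ++ [(v, e)])
          g1.insert v (g1.getD v [] ++ [(u, (PySem.List.slice? e none none (-1)).getD [])])) gA) := by
  intro es
  induction es with
  | nil => intro gA dB hR hA hB hm; exact ⟨hR, hA, hB, hm⟩
  | cons e t ih =>
    intro gA dB hR hA hB hm
    simp only [List.foldl_cons]
    obtain ⟨hR1, hA1, hB1, hm1⟩ :=
      stepB_one gA dB ((PySem.List.pyGet? e 0).getD 0) ((PySem.List.pyGet? e (-1)).getD 0) e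
        hR hA hB hm
    obtain ⟨hR2, hA2, hB2, hm2⟩ :=
      stepB_one _ _ ((PySem.List.pyGet? e (-1)).getD 0) ((PySem.List.pyGet? e 0).getD 0)
        ((PySem.List.slice? e none none (-1)).getD []) hR1 hA1 hB1 hm1
    exact ih _ _ hR2 hA2 hB2 hm2

lemma build_aux : ∀ (es : List (List Int)) (g : GraphT), GOK g →
    GOK (es.foldl (fun g e =>
      let u := (PySem.List.pyGet? e 0).getD 0
      let v := (PySem.List.pyGet? e (-1)).getD 0
      let g1 := g.insert u (g.getD u [] ++ [(v, e)])
      g1.insert v (g1.getD v [] ++ [(u, (PySem.List.slice? e none none (-1)).getD [])])) g)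
    ∧ msize (es.foldl (fun g e =>
      let u := (PySem.List.pyGet? e 0).getD 0
      let v := (PySem.List.pyGet? e (-1)).getD 0
      let g1 := g.insert u (g.getD u [] ++ [(v, e)])
      g1.insert v (g1.getD v [] ++ [(u, (PySem.List.slice? e none none (-1)).getD [])])) g)
      = msize g + 2 * es.length := by
  intro es
  induction es with
  | nil => intro g hg; exact ⟨hg, by simp⟩
  | cons e t ih =>
    intro g hg
    simp only [List.foldl_cons, List.length_cons]
    set u := (PySem.List.pyGet? e 0).getD 0
    set v := (PySem.List.pyGet? e (-1)).getD 0
    set g1 := g.insert u (g.getD u [] ++ [(v, e)]) with hg1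
    set g2 := g1.insert v (g1.getD v [] ++ [(u, (PySem.List.slice? e none none (-1)).getD [])]) with hg2
    have h1g : GOK g1 := gok_insert _ _ _ hg
    have h2g : GOK g2 := gok_insert _ _ _ h1g
    have h1 := msize_insert g u (g.getD u [] ++ [(v, e)]) hg
    have h2 := msize_insert g1 v (g1.getD v [] ++ [(u, (PySem.List.slice? e none none (-1)).getD [])]) h1g
    rw [List.length_append] at h1 h2
    have hm2 : msize g2 = msize g + 2 := by
      rw [← hg1] at h1; rw [← hg2] at h2
      simp only [List.length_cons, List.length_nil] at h1 h2
      omega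
    obtain ⟨ha, hb⟩ := ih g2 h2g
    exact ⟨ha, by rw [hb, hm2]; ring⟩

lemma build_inv (edges : List (List Int)) :
    GOK (buildGraph edges) ∧ msize (buildGraph edges) ≤ 2 * edges.length := by
  unfold buildGraph
  have hgok : GOK PySem.Dict.empty := by
    unfold GOK PySem.Dict.empty
    simp
  obtain ⟨ha, hb⟩ := build_aux edges PySem.Dict.empty hgok
  refine ⟨ha, ?_⟩
  rw [hb]
  have : msize PySem.Dict.empty = 0 := rfl
  omega

-- Source B's two foldl passes collapse to one pass of double stepB over edges
lemma buildAdj_eq (edges : List (List Int)) :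
    buildAdj (buildArcs edges)
      = edges.foldl (fun d e => stepB (stepB d (arc1 e)) (arc2 e)) PySem.Dict.empty := by
  have harcs : buildArcs edges = edges.flatMap (fun e => [arc1 e, arc2 e]) := by
    unfold buildArcs
    have hfn : (fun (acc : List (Int × Int × List Int)) edge =>
        (acc ++ [((PySem.List.pyGet? edge 0).getD 0, (PySem.List.pyGet? edge (-1)).getD 0, edge)]) ++
        [((PySem.List.pyGet? edge (-1)).getD 0, (PySem.List.pyGet? edge 0).getD 0,
          (PySem.List.slice? edge none none (-1)).getD [])])
        = (fun acc edge => acc ++ [arc1 edge, arc2 edge]) := by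
      funext acc edge
      simp [arc1, arc2]
    rw [hfn, PySem.List.foldl_append_eq_flatMap]
    simp
  rw [harcs]
  clear harcs
  unfold buildAdj
  generalize (PySem.Dict.empty : GraphT) = d0
  induction edges generalizing d0 with
  | nil => simp
  | cons e t ih =>
    simp only [List.flatMap_cons, List.foldl_cons, List.foldl_append, List.foldl_cons,
      List.foldl_nil]
    simpa only [stepB] using ih (stepB (stepB d0 (arc1 e)) (arc2 e))

lemma loopB_nil (f : Nat) (d : GraphT) (vis : VisT) (path : List Int) :
    loopB f [] d vis path = (d, vis, path) := by
  cases f <;> rfl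

lemma loopB_irrel : ∀ (f f' : Nat) (s : List Int) (d : GraphT) (vis : VisT) (path : List Int),
    GOK d → 2 * msize d + s.length ≤ f → 2 * msize d + s.length ≤ f' →
    loopB f s d vis path = loopB f' s d vis path := by
  intro f
  induction f with
  | zero =>
    intro f' s d vis path _ h _
    cases s with
    | nil => rw [loopB_nil, loopB_nil]
    | cons cur rest => simp at h
  | succ f ih =>
    intro f' s d vis path hd hf hf'
    cases s with
    | nil => rw [loopB_nil, loopB_nil]
    | cons cur rest =>
      cases f' with
      | zero => simp at hf'
      | succ f'' =>
        conv_lhs => rw [loopB]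
        conv_rhs => rw [loopB]
        cases hadj : d.getD cur [] with
        | nil =>
          exact ih f'' rest d vis path hd (by simp at hf ⊢; omega) (by simp at hf' ⊢; omega)
        | cons p rem =>
          obtain ⟨nb, lbl⟩ := p
          have hle := getD_len_le d cur
          have hmi := msize_insert d cur rem hd
          rw [hadj] at hle hmi
          have hgok' : GOK (d.insert cur rem) := gok_insert _ _ _ hd
          have hms : msize (d.insert cur rem) + 1 = msize d := by
            simp only [List.length_cons] at hmi
            omega
          simp only [List.length_cons] at hf hf'
          dsimp only
          by_cases hv : PySem.Set.contains vis lbl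
          · rw [if_pos hv, if_pos hv]
            exact ih f'' (cur :: rest) (d.insert cur rem) vis path hgok'
              (by simp; omega) (by simp; omega)
          · rw [if_neg hv, if_neg hv]
            exact ih f'' (nb :: cur :: rest) (d.insert cur rem) (PySem.Set.add vis lbl) (path ++ lbl)
              hgok' (by simp; omega) (by simp; omega)

lemma dfsA_msize : ∀ (f : Nat) (cur : Int) (g : GraphT) (vis : VisT) (path : List Int),
    GOK g → GOK (dfsA f cur g vis path).1 ∧ msize (dfsA f cur g vis path).1 ≤ msize g := by
  intro f
  induction f with
  | zero => intro cur g vis path hg; exact ⟨hg, le_refl _⟩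
  | succ f ih =>
    intro cur g vis path hg
    rw [dfsA]
    cases hpop : PySem.List.pop? (g.getD cur []) (-1) with
    | none => exact ⟨hg, le_refl _⟩
    | some pr =>
      obtain ⟨⟨nb, e⟩, rest⟩ := pr
      have hlen : rest.length + 1 = (g.getD cur []).length := PySem.List.length_of_pop?_eq_some _ hpop
      have hle := getD_len_le g cur
      have hmi := msize_insert g cur rest hg
      have hgok' : GOK (g.insert cur rest) := gok_insert _ _ _ hg
      have hms : msize (g.insert cur rest) + 1 = msize g := by omega
      dsimp only
      by_cases hv : PySem.Set.contains vis e
      · rw [if_pos hv]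
        obtain ⟨ha, hb⟩ := ih cur (g.insert cur rest) vis path hgok'
        exact ⟨ha, le_trans hb (by omega)⟩
      · rw [if_neg hv]
        obtain ⟨ha, hb⟩ := ih nb (g.insert cur rest) (PySem.Set.add vis e) (path ++ e) hgok'
        obtain ⟨hc, hd⟩ := ih cur _ _ _ ha
        exact ⟨hc, le_trans hd (le_trans hb (by omega))⟩

-- the simulation: running A's recursive dfs from cur equals B's loop with cur pushed on the stack
lemma sim : ∀ (fA fB : Nat) (s : List Int) (cur : Int) (gA dB : GraphT) (vis : VisT) (path : List Int),
    AdjRel gA dB → GOK gA → GOK dB → msize dB = msize gA → msize gA ≤ fA →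
    2 * msize dB + s.length + 1 ≤ fB →
    ∃ dB', AdjRel (dfsA fA cur gA vis path).1 dB' ∧ GOK dB'
      ∧ msize dB' = msize (dfsA fA cur gA vis path).1
      ∧ ∀ fB', 2 * msize dB' + s.length ≤ fB' →
          loopB fB (cur :: s) dB vis path
            = loopB fB' s dB' (dfsA fA cur gA vis path).2.1 (dfsA fA cur gA vis path).2.2 := by
  intro fA
  induction fA with
  | zero =>
    intro fB s cur gA dB vis path hR hA hB hm h0 hfB
    have hnilA : gA.getD cur [] = [] := by
      have := getD_len_le gA cur
      exact List.eq_nil_of_length_eq_zero (by omega)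
    have hnilB : dB.getD cur [] = [] := by rw [hR cur, hnilA]; rfl
    have hd0 : dfsA 0 cur gA vis path = (gA, vis, path) := rfl
    refine ⟨dB, by rw [hd0]; exact hR, hB, by rw [hd0]; exact hm, ?_⟩
    intro fB' hfB'
    rw [hd0]
    cases fB with
    | zero => simp at hfB
    | succ fb =>
      conv_lhs => rw [loopB]
      rw [hnilB]
      exact loopB_irrel fb fB' s dB vis path hB (by omega) hfB'
  | succ fA ih =>
    intro fB s cur gA dB vis path hR hA hB hm hfA hfB
    cases fB with
    | zero => simp at hfB
    | succ fb =>
      rcases List.eq_nil_or_concat (gA.getD cur []) with hnilA | ⟨rest, p, hl⟩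
      · have hnilB : dB.getD cur [] = [] := by rw [hR cur, hnilA]; rfl
        have h1 : dfsA (fA+1) cur gA vis path = (gA, vis, path) := by
          rw [dfsA, hnilA, pop?_nil]
        refine ⟨dB, by rw [h1]; exact hR, hB, by rw [h1]; exact hm, ?_⟩
        intro fB' hfB'
        rw [h1]
        conv_lhs => rw [loopB]
        rw [hnilB]
        exact loopB_irrel fb fB' s dB vis path hB (by omega) hfB'
      · obtain ⟨nb, e⟩ := p
        have hpop : PySem.List.pop? (gA.getD cur []) (-1) = some ((nb, e), rest) := by
          rw [hl, List.concat_eq_append]; exact PySem.List.pop?_last _ _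
        have hlB : dB.getD cur [] = (nb, e) :: rest.reverse := by
          rw [hR cur, hl]; simp
        have hlenA : (gA.getD cur []).length = rest.length + 1 := by rw [hl]; simp
        have hmiA := msize_insert gA cur rest hA
        have hmiB := msize_insert dB cur rest.reverse hB
        rw [hlB] at hmiB
        simp only [List.length_cons, List.length_reverse] at hmiB
        have hgA' : GOK (gA.insert cur rest) := gok_insert _ _ _ hA
        have hdB' : GOK (dB.insert cur rest.reverse) := gok_insert _ _ _ hB
        have hmsA : msize (gA.insert cur rest) + 1 = msize gA := by omega
        have hmsB : msize (dB.insert cur rest.reverse) + 1 = msize dB := by omega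
        have hR' : AdjRel (gA.insert cur rest) (dB.insert cur rest.reverse) := by
          intro j
          rw [PySem.Dict.getD_insert, PySem.Dict.getD_insert]
          by_cases hj : j = cur
          · rw [if_pos hj, if_pos hj]
          · rw [if_neg hj, if_neg hj]; exact hR j
        by_cases hv : PySem.Set.contains vis e
        · have hstep : dfsA (fA+1) cur gA vis path
              = dfsA fA cur (gA.insert cur rest) vis path := by
            rw [dfsA, hpop]; dsimp only; rw [if_pos hv]
          obtain ⟨dB', hR2, hB2, hm2, heq⟩ :=
            ih fb s cur (gA.insert cur rest) (dB.insert cur rest.reverse) vis path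
              hR' hgA' hdB' (by omega) (by omega) (by omega)
          refine ⟨dB', by rw [hstep]; exact hR2, hB2, by rw [hstep]; exact hm2, ?_⟩
          intro fB' hfB'
          rw [hstep]
          conv_lhs => rw [loopB]
          rw [hlB]
          dsimp only
          rw [if_pos hv]
          exact heq fB' hfB'
        · have hstep : dfsA (fA+1) cur gA vis path
              = dfsA fA cur
                  (dfsA fA nb (gA.insert cur rest) (PySem.Set.add vis e) (path ++ e)).1
                  (dfsA fA nb (gA.insert cur rest) (PySem.Set.add vis e) (path ++ e)).2.1
                  (dfsA fA nb (gA.insert cur rest) (PySem.Set.add vis e) (path ++ e)).2.2 := by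
            rw [dfsA, hpop]; dsimp only; rw [if_neg hv]
          set r := dfsA fA nb (gA.insert cur rest) (PySem.Set.add vis e) (path ++ e) with hr
          obtain ⟨hrg, hrm⟩ := dfsA_msize fA nb (gA.insert cur rest) (PySem.Set.add vis e) (path ++ e) hgA'
          rw [← hr] at hrg hrm
          obtain ⟨dB1, hR1, hB1, hm1, heq1⟩ :=
            ih fb (cur :: s) nb (gA.insert cur rest) (dB.insert cur rest.reverse)
              (PySem.Set.add vis e) (path ++ e) hR' hgA' hdB' (by omega) (by omega)
              (by simp only [List.length_cons]; omega)
          rw [← hr] at hR1 hm1 heq1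
          obtain ⟨dB2, hR2, hB2, hm2, heq2⟩ :=
            ih (2 * msize dB1 + s.length + 1) s cur r.1 dB1 r.2.1 r.2.2
              hR1 hrg hB1 hm1 (by omega) (by omega)
          refine ⟨dB2, by rw [hstep]; exact hR2, hB2, by rw [hstep]; exact hm2, ?_⟩
          intro fB' hfB'
          rw [hstep]
          conv_lhs => rw [loopB]
          rw [hlB]
          dsimp only
          rw [if_neg hv]
          rw [heq1 (2 * msize dB1 + (cur :: s).length) (by simp)]
          simp only [List.length_cons]
          exact heq2 fB' hfB'

-- ===== VERDICT (by name: the statement is the Claim_ definition above) =====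
theorem path_creation_spec : Claim_equal_path_creation := by
  intro edges _ _
  unfold Spec_path_creation path_creation path_creation_alt
  obtain ⟨hgokA, hmA⟩ := build_inv edges
  have hgokE : GOK PySem.Dict.empty := by unfold GOK PySem.Dict.empty; simp
  have hmE : msize (PySem.Dict.empty : GraphT) = 0 := rfl
  have hRE : AdjRel PySem.Dict.empty PySem.Dict.empty := by intro k; rfl
  obtain ⟨hR, _, hgokB, hm⟩ :=
    build_rel edges PySem.Dict.empty PySem.Dict.empty hRE hgokE hgokE rfl
  rw [← buildAdj_eq] at hR hgokB hm
  have hbg : buildGraph edges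
      = edges.foldl (fun g e =>
          let u := (PySem.List.pyGet? e 0).getD 0
          let v := (PySem.List.pyGet? e (-1)).getD 0
          let g1 := g.insert u (g.getD u [] ++ [(v, e)])
          g1.insert v (g1.getD v [] ++ [(u, (PySem.List.slice? e none none (-1)).getD [])]))
          PySem.Dict.empty := rfl
  rw [← hbg] at hR hm
  set g := buildGraph edges with hg
  set adj := buildAdj (buildArcs edges) with hadj
  set start := (PySem.List.pyGet? ((PySem.List.pyGet? edges 0).getD []) 0).getD 0 with hs
  obtain ⟨dB', _, _, hm', heq⟩ :=
    sim (2 * edges.length) (4 * edges.length + 1) [] start g adj [] []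
      hR hgokA hgokB hm hmA (by simp; omega)
  have h := heq (2 * msize dB') (by simp)
  show (dfsA (2 * edges.length) start g [] []).2.2
      = (loopB (4 * edges.length + 1) [start] adj [] []).2.2
  rw [h, loopB_nil]
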